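-- pv_equiv track=rewrite | github.com/Ritesh20000/AMR-assignment | Diatomic Ring.py | GenMat
-- ===== SOURCE A (Python) =====
-- def GenMat(x,y,z,n):
--     Y = []
--     i = 0
--     while i < n:
--         X = []
--         j = 0
--         while j<n:
--             X.append(0)
--             j = j + 1
--         Y.append(X)
--         i = i + 1
--     for i in range(n):
--         for j in range(n):
--             if (i == j):
--                 Y[i][j] = x
--                 if i >= n-1:
--                     break
--                 else:
--                     Y[i+1][j] = y
--                 if j >= n-1:
--                     break
--                 else:
--                     Y[i][j+1] = y
--     i = 0
--     while i<n:
--         Y[i][i] = z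
--         i = i + 2
--
--     Y[0][n-1] = y
--     Y[n-1][0] = y
--     i = 0
--     j = 0
--
--
--
--
--     return Y
-- ===== SOURCE B (Python) =====
-- def GenMat(x, y, z, n):
--     m = n - 1
--     return [[y if (abs(i - j) == 1 or (i == 0 and j == m) or (i == m and j == 0))
--              else ((z if i % 2 == 0 else x) if i == j else 0)
--              for j in range(n)] for i in range(n)]
-- ===== Notes on version B (the rewrite author's own statement) =====
-- stated objective: simpler
-- what changed: B computes every cell directly from its position by one rule (neighbour-or-wrap -> y, even diagonal -> z, diagonal -> x, else 0) in a single nested comprehension, instead of A's zero-matrix initialization followed by three separate mutation passes plus corner patches.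
import Mathlib
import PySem

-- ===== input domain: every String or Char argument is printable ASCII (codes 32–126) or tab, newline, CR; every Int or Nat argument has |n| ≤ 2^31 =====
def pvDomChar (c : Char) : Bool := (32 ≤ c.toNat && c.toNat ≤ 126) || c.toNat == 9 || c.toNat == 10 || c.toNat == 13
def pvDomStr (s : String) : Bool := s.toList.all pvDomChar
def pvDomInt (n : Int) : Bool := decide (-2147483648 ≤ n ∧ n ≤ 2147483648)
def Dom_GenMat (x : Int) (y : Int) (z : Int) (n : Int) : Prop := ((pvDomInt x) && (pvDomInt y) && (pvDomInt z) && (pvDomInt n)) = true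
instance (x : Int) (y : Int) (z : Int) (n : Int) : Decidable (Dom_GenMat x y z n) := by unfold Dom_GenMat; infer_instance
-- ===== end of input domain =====

-- B replaces A's init-then-patch mutation passes by computing each cell directly from its
-- position with one rule (objective: simpler); equivalence is about the return value only.

-- ===== PORT A =====
-- Python assignment Y[i][j] = v (all indices used by A are nonnegative and in range under Pre_)
def pvSetC (M : List (List Int)) (i j v : Int) : List (List Int) :=
  PySem.List.pySetD M i (PySem.List.pySetD (PySem.List.pyGetD M i []) j v)

-- 'while j < n: X.append(0); j = j + 1'
def pvRowLoop (n j : Int) (X : List Int) : List Int :=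
  if _h : j < n then pvRowLoop n (j + 1) (X ++ [0]) else X
termination_by (n - j).toNat
decreasing_by omega

-- 'while i < n: Y.append(X); i = i + 1'  (X rebuilt each iteration)
def pvZeroLoop (n i : Int) (Y : List (List Int)) : List (List Int) :=
  if _h : i < n then pvZeroLoop n (i + 1) (Y ++ [pvRowLoop n 0 []]) else Y
termination_by (n - i).toNat
decreasing_by omega

-- inner 'for j in range(n)' with its breaks (break = return the current matrix)
def pvInnerJ (x y n i : Int) (js : List Int) (Y : List (List Int)) : List (List Int) :=
  match js with
  | [] => Y
  | j :: rest =>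
    if i = j then
      let Y1 := pvSetC Y i j x
      if i ≥ n - 1 then Y1
      else
        let Y2 := pvSetC Y1 (i + 1) j y
        if j ≥ n - 1 then Y2
        else pvInnerJ x y n i rest (pvSetC Y2 i (j + 1) y)
    else pvInnerJ x y n i rest Y

-- outer 'for i in range(n)'
def pvOuterI (x y n : Int) (is_ : List Int) (Y : List (List Int)) : List (List Int) :=
  match is_ with
  | [] => Y
  | i :: rest => pvOuterI x y n rest (pvInnerJ x y n i (PySem.List.pyRange 0 n 1) Y)

-- 'while i < n: Y[i][i] = z; i = i + 2'
def pvEvenLoop (z n i : Int) (Y : List (List Int)) : List (List Int) :=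
  if _h : i < n then pvEvenLoop z n (i + 2) (pvSetC Y i i z) else Y
termination_by (n - i).toNat
decreasing_by omega

def GenMat (x : Int) (y : Int) (z : Int) (n : Int) : List (List Int) :=
  let Y0 := pvZeroLoop n 0 []
  let Y1 := pvOuterI x y n (PySem.List.pyRange 0 n 1) Y0
  let Y2 := pvEvenLoop z n 0 Y1
  let Y3 := pvSetC Y2 0 (n - 1) y
  pvSetC Y3 (n - 1) 0 y

-- ===== PORT B =====
def pvCell (x y z n i j : Int) : Int :=
  if (i - j).natAbs = 1 ∨ (i = 0 ∧ j = n - 1) ∨ (i = n - 1 ∧ j = 0) then y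
  else if i = j then (if PySem.Int.mod i 2 = 0 then z else x)
  else 0

def GenMat_alt (x : Int) (y : Int) (z : Int) (n : Int) : List (List Int) :=
  (PySem.List.pyRange 0 n 1).map (fun i =>
    (PySem.List.pyRange 0 n 1).map (fun j => pvCell x y z n i j))

-- ===== PRECONDITION & SPEC =====
-- For n ≤ 0 the final corner assignment Y[0][n-1] = y raises IndexError on the empty Y.
def Pre_GenMat (x : Int) (y : Int) (z : Int) (n : Int) : Prop := 1 ≤ n
instance (x : Int) (y : Int) (z : Int) (n : Int) : Decidable (Pre_GenMat x y z n) := by unfold Pre_GenMat; infer_instance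
def pvWitness_GenMat : Int × Int × Int × Int := (1, 2, 3, 3)

def Spec_GenMat (x : Int) (y : Int) (z : Int) (n : Int) (out : List (List Int)) : Prop := out = GenMat_alt x y z n
instance (x : Int) (y : Int) (z : Int) (n : Int) (out : List (List Int)) : Decidable (Spec_GenMat x y z n out) := by unfold Spec_GenMat; infer_instance

-- ===== CLAIM (what is proved, stated in full; the proofs are below) =====
def Claim_equal_GenMat : Prop := ∀ (x : Int) (y : Int) (z : Int) (n : Int), Dom_GenMat x y z n → Pre_GenMat x y z n → Spec_GenMat x y z n (GenMat x y z n)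
-- ===== LEMMAS AND PROOFS =====

-- the value of cell (p, q): row p (default []), entry q (default 0)
def pvGc (M : List (List Int)) (p q : Nat) : Int := (M.getD p []).getD q 0

-- N-by-N shape
def pvShape (N : Nat) (M : List (List Int)) : Prop :=
  M.length = N ∧ ∀ p, p < N → (M.getD p []).length = N

lemma pvRowLoop_eq (n j : Int) (X : List Int) :
    pvRowLoop n j X = X ++ List.replicate (n - j).toNat 0 := by
  fun_induction pvRowLoop n j X with
  | case1 j X h ih =>
    rw [ih]
    have h2 : (n - j).toNat = (n - (j + 1)).toNat + 1 := by omega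
    rw [h2, List.replicate_succ]
    simp
  | case2 j X h =>
    have h2 : (n - j).toNat = 0 := by omega
    simp [h2]

lemma pvSetC_natCast (M : List (List Int)) (a b : Nat) (v : Int) :
    pvSetC M (a : Int) (b : Int) v = M.set a ((M.getD a []).set b v) := by
  simp [pvSetC]

lemma getD_set_row (M : List (List Int)) (a : Nat) (R : List Int) (p : Nat) :
    ((M.set a R).getD p []) = if p = a ∧ a < M.length then R else M.getD p [] := by
  simp [List.getD, List.getElem?_set]
  split_ifs with h1 h2 h3 <;> simp_all

lemma rowlen_pvSetC (M : List (List Int)) (a b : Nat) (v : Int) (p : Nat) :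
    ((pvSetC M (a : Int) (b : Int) v).getD p []).length = (M.getD p []).length := by
  rw [pvSetC_natCast, getD_set_row]
  split_ifs with h
  · rw [h.1]; simp
  · rfl

lemma gc_pvSetC {N : Nat} {M : List (List Int)} (h : pvShape N M) (a b : Nat)
    (ha : a < N) (hb : b < N) (v : Int) (p q : Nat) :
    pvGc (pvSetC M (a : Int) (b : Int) v) p q = if p = a ∧ q = b then v else pvGc M p q := by
  have hlen : a < M.length := by rw [h.1]; exact ha
  have hrow : b < (M.getD a []).length := by rw [h.2 a ha]; exact hb
  unfold pvGc
  rw [pvSetC_natCast, getD_set_row]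
  by_cases hpa : p = a
  · subst hpa
    rw [if_pos (And.intro rfl hlen)]
    by_cases hqb : q = b
    · subst hqb
      have hrow2 : q < (M[p]'hlen).length := by
        simpa [List.getD, List.getElem?_eq_getElem hlen] using hrow
      simp [List.getD, hlen, hrow2]
    · simp [List.getD, hlen, hqb, Ne.symm hqb]
  · have h2 : ¬ (p = a ∧ a < M.length) := fun hc => hpa hc.1
    have h3 : ¬ (p = a ∧ q = b) := fun hc => hpa hc.1
    rw [if_neg h2, if_neg h3]

lemma shape_pvSetC {N : Nat} {M : List (List Int)} (h : pvShape N M) (a b : Nat) (v : Int) :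
    pvShape N (pvSetC M (a : Int) (b : Int) v) := by
  refine ⟨?_, fun p hp => ?_⟩
  · simp [pvSetC]; exact h.1
  · rw [rowlen_pvSetC]; exact h.2 p hp

lemma shape_zero (N : Nat) : pvShape N (List.replicate N (List.replicate N (0 : Int))) := by
  refine ⟨by simp, fun p hp => ?_⟩
  simp [List.getD, hp]

lemma gc_zero (N : Nat) (p q : Nat) : pvGc (List.replicate N (List.replicate N (0 : Int))) p q = 0 := by
  simp [pvGc, List.getD, List.getElem?_replicate]
  split_ifs <;> simp

lemma pvInnerJ_skip (x y n i : Int) (js rest : List Int) (Y : List (List Int)) (h : i ∉ js) :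
    pvInnerJ x y n i (js ++ rest) Y = pvInnerJ x y n i rest Y := by
  induction js generalizing Y with
  | nil => rfl
  | cons j t ih =>
    have hne : i ≠ j := by intro he; exact h (he ▸ List.mem_cons_self)
    simp only [List.cons_append, pvInnerJ, if_neg hne]
    exact ih _ (fun hm => h (List.mem_cons_of_mem _ hm))

lemma pvInnerJ_nil (x y n i : Int) (js : List Int) (Y : List (List Int)) (h : i ∉ js) :
    pvInnerJ x y n i js Y = Y := by
  simpa using pvInnerJ_skip x y n i js [] Y h

lemma pvInnerJ_eq (x y n : Int) (N : Nat) (hn : n = (N : Int)) (i : Nat) (hi : i < N)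
    (Y : List (List Int)) :
    pvInnerJ x y n (i : Int) (PySem.List.pyRange 0 n 1) Y =
      if (i : Int) ≥ n - 1 then pvSetC Y (i : Int) (i : Int) x
      else pvSetC (pvSetC (pvSetC Y (i : Int) (i : Int) x) ((i : Int) + 1) (i : Int) y) (i : Int) ((i : Int) + 1) y := by
  have hin : (i : Int) < n := by omega
  rw [PySem.List.pyRange_one_append 0 (i : Int) n (by omega) (by omega),
    pvInnerJ_skip _ _ _ _ _ _ _ (by simp [PySem.List.mem_pyRange_one]),
    PySem.List.pyRange_one_cons hin]
  simp only [pvInnerJ, if_pos]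
  by_cases hge : (i : Int) ≥ n - 1
  · simp [hge]
  · simp only [if_neg hge, ge_iff_le]
    exact pvInnerJ_nil _ _ _ _ _ _ (by simp [PySem.List.mem_pyRange_one])

lemma pvOuterI_gc (x y n : Int) (N : Nat) (hn : n = (N : Int)) (k : Nat) (hk : k ≤ N)
    (Y : List (List Int)) (hY : pvShape N Y) :
    pvShape N (pvOuterI x y n (PySem.List.pyRange (k : Int) n 1) Y) ∧
    ∀ p q, pvGc (pvOuterI x y n (PySem.List.pyRange (k : Int) n 1) Y) p q =
      if p = q ∧ k ≤ p ∧ p < N then x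
      else if ((p + 1 = q ∧ k ≤ p) ∨ (q + 1 = p ∧ k ≤ q)) ∧ p < N ∧ q < N then y
      else pvGc Y p q := by
  suffices H : ∀ m k, k ≤ N → N - k ≤ m → ∀ Y : List (List Int), pvShape N Y →
      pvShape N (pvOuterI x y n (PySem.List.pyRange (k : Int) n 1) Y) ∧
      ∀ p q, pvGc (pvOuterI x y n (PySem.List.pyRange (k : Int) n 1) Y) p q =
        if p = q ∧ k ≤ p ∧ p < N then x
        else if ((p + 1 = q ∧ k ≤ p) ∨ (q + 1 = p ∧ k ≤ q)) ∧ p < N ∧ q < N then y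
        else pvGc Y p q by
    exact H (N - k) k hk le_rfl Y hY
  intro m
  induction m with
  | zero =>
    intro k hk hm Y hY
    have hkN : k = N := by omega
    rw [PySem.List.pyRange_one_eq_nil (by omega)]
    refine ⟨hY, fun p q => ?_⟩
    simp only [pvOuterI]
    split_ifs with h1 h2 <;> first | rfl | omega
  | succ m ih =>
    intro k hk hm Y hY
    by_cases hlt : k < N
    · rw [PySem.List.pyRange_one_cons (by omega)]
      simp only [pvOuterI]
      rw [pvInnerJ_eq x y n N hn k hlt Y]
      have hcast : ((k : Int) + 1) = ((k + 1 : Nat) : Int) := by push_cast; ring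
      by_cases hge : (k : Int) ≥ n - 1
      · -- k = N - 1 : only the diagonal cell is written
        rw [if_pos hge, hcast]
        have hS : pvShape N (pvSetC Y (k : Int) (k : Int) x) := shape_pvSetC hY k k x
        have hrec := ih (k + 1) (by omega) (by omega) _ hS
        refine ⟨hrec.1, fun p q => ?_⟩
        rw [hrec.2 p q, gc_pvSetC hY k k hlt hlt x p q]
        split_ifs <;> first | rfl | omega
      · rw [if_neg hge, hcast]
        have hk1 : k + 1 < N := by omega
        have hS1 : pvShape N (pvSetC Y (k : Int) (k : Int) x) := shape_pvSetC hY k k x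
        have hS2 := shape_pvSetC hS1 (k + 1) k y
        have hS3 := shape_pvSetC hS2 k (k + 1) y
        have hrec := ih (k + 1) (by omega) (by omega) _ hS3
        refine ⟨hrec.1, fun p q => ?_⟩
        rw [hrec.2 p q, gc_pvSetC hS2 k (k + 1) hlt hk1 y p q,
          gc_pvSetC hS1 (k + 1) k hk1 hlt y p q, gc_pvSetC hY k k hlt hlt x p q]
        split_ifs <;> first | rfl | omega
    · have hkN : k = N := by omega
      rw [PySem.List.pyRange_one_eq_nil (by omega)]
      refine ⟨hY, fun p q => ?_⟩
      simp only [pvOuterI]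
      split_ifs <;> first | rfl | omega

lemma pvEvenLoop_gc (z n : Int) (N : Nat) (hn : n = (N : Int)) (i : Int) (h0 : 0 ≤ i)
    (Y : List (List Int)) (hY : pvShape N Y) :
    pvShape N (pvEvenLoop z n i Y) ∧
    ∀ p q, pvGc (pvEvenLoop z n i Y) p q =
      if p = q ∧ p < N ∧ i ≤ (p : Int) ∧ 2 ∣ ((p : Int) - i) then z else pvGc Y p q := by
  suffices H : ∀ m (i : Int), 0 ≤ i → (n - i).toNat ≤ m → ∀ Y : List (List Int), pvShape N Y →
      pvShape N (pvEvenLoop z n i Y) ∧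
      ∀ p q, pvGc (pvEvenLoop z n i Y) p q =
        if p = q ∧ p < N ∧ i ≤ (p : Int) ∧ 2 ∣ ((p : Int) - i) then z else pvGc Y p q by
    exact H (n - i).toNat i h0 le_rfl Y hY
  intro m
  induction m with
  | zero =>
    intro i h0 hm Y hY
    have hni : ¬ i < n := by omega
    rw [pvEvenLoop, dif_neg hni]
    refine ⟨hY, fun p q => ?_⟩
    split_ifs with h1 <;> first | rfl | omega
  | succ m ih =>
    intro i h0 hm Y hY
    by_cases hlt : i < n
    · rw [pvEvenLoop, dif_pos hlt]
      have hiN : i.toNat < N := by omega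
      have hcast : i = ((i.toNat : Nat) : Int) := by omega
      rw [hcast]
      have hS : pvShape N (pvSetC Y (i.toNat : Int) (i.toNat : Int) z) := shape_pvSetC hY i.toNat i.toNat z
      have hrec := ih ((i.toNat : Int) + 2) (by omega) (by omega) _ hS
      refine ⟨hrec.1, fun p q => ?_⟩
      rw [hrec.2 p q, gc_pvSetC hY i.toNat i.toNat hiN hiN z p q]
      split_ifs <;> first | rfl | omega
    · rw [pvEvenLoop, dif_neg hlt]
      refine ⟨hY, fun p q => ?_⟩
      split_ifs <;> first | rfl | omega

lemma pyRange_zero_eq (n : Int) (N : Nat) (hn : n = (N : Int)) :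
    PySem.List.pyRange 0 n 1 = (List.range N).map (fun k : Nat => (k : Int)) := by
  rw [PySem.List.pyRange_one 0 n]
  have : (n - 0).toNat = N := by omega
  rw [this]
  simp

lemma gc_alt (x y z n : Int) (N : Nat) (hn : n = (N : Int)) :
    pvShape N (GenMat_alt x y z n) ∧
    ∀ p q, p < N → q < N → pvGc (GenMat_alt x y z n) p q = pvCell x y z n (p : Int) (q : Int) := by
  have hR := pyRange_zero_eq n N hn
  refine ⟨⟨by simp [GenMat_alt, hR], fun p hp => ?_⟩, fun p q hp hq => ?_⟩
  · simp [GenMat_alt, hR, List.getD, hp]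
  · simp [GenMat_alt, hR, pvGc, List.getD, hp, hq]

lemma matrix_ext {N : Nat} {A B : List (List Int)} (hA : pvShape N A) (hB : pvShape N B)
    (h : ∀ p q, p < N → q < N → pvGc A p q = pvGc B p q) : A = B := by
  apply List.ext_getElem (by rw [hA.1, hB.1])
  intro p h1 h2
  have hpN : p < N := by rw [← hA.1]; exact h1
  have eA : A.getD p [] = A[p] := by simp [List.getD, List.getElem?_eq_getElem h1]
  have eB : B.getD p [] = B[p] := by simp [List.getD, List.getElem?_eq_getElem h2]
  have lA : A[p].length = N := by rw [← eA]; exact hA.2 p hpN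
  have lB : B[p].length = N := by rw [← eB]; exact hB.2 p hpN
  apply List.ext_getElem (by rw [lA, lB])
  intro q hq1 hq2
  have hqN : q < N := by rw [← lA]; exact hq1
  have := h p q hpN hqN
  unfold pvGc at this
  rw [eA, eB] at this
  simpa [List.getD, List.getElem?_eq_getElem hq1, List.getElem?_eq_getElem hq2] using this

lemma pvZeroLoop_eq (n i : Int) (Y : List (List Int)) :
    pvZeroLoop n i Y = Y ++ List.replicate (n - i).toNat (pvRowLoop n 0 []) := by
  fun_induction pvZeroLoop n i Y with
  | case1 i Y h ih =>
    rw [ih]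
    have h2 : (n - i).toNat = (n - (i + 1)).toNat + 1 := by omega
    rw [h2, List.replicate_succ]
    simp
  | case2 i Y h =>
    have h2 : (n - i).toNat = 0 := by omega
    simp [h2]

lemma GenMat_eq_alt (x y z n : Int) (hpre : 1 ≤ n) : GenMat x y z n = GenMat_alt x y z n := by
  set N := n.toNat with hNdef
  have hn : n = (N : Int) := by omega
  have hzero : pvZeroLoop n 0 [] = List.replicate N (List.replicate N (0 : Int)) := by
    rw [pvZeroLoop_eq, pvRowLoop_eq]
    have h2 : (n - 0).toNat = N := by omega
    rw [h2]
    simp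
  have hO := pvOuterI_gc x y n N hn 0 (by omega) _ (shape_zero N)
  simp only [Nat.cast_zero] at hO
  obtain ⟨hOs, hOg⟩ := hO
  have hE := pvEvenLoop_gc z n N hn 0 (by omega) _ hOs
  obtain ⟨hEs, hEg⟩ := hE
  have hc1 : (n - 1 : Int) = ((N - 1 : Nat) : Int) := by omega
  have hc0 : (0 : Int) = ((0 : Nat) : Int) := rfl
  set Y2 := pvEvenLoop z n 0 (pvOuterI x y n (PySem.List.pyRange 0 n 1) (List.replicate N (List.replicate N (0 : Int)))) with hY2
  have hS3 : pvShape N (pvSetC Y2 0 (n - 1) y) := by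
    rw [hc1, hc0]; exact shape_pvSetC hEs 0 (N - 1) y
  have hS4 : pvShape N (pvSetC (pvSetC Y2 0 (n - 1) y) (n - 1) 0 y) := by
    rw [hc1, hc0]; exact shape_pvSetC (by rw [← hc1, ← hc0]; exact hS3) (N - 1) 0 y
  have halt := gc_alt x y z n N hn
  have hstep : GenMat x y z n = pvSetC (pvSetC Y2 0 (n - 1) y) (n - 1) 0 y := by
    simp only [GenMat, hzero, hY2]
  rw [hstep]
  apply matrix_ext hS4 halt.1
  intro p q hp hq
  rw [halt.2 p q hp hq]
  have hN1 : 1 ≤ N := by omega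
  have e4 : pvGc (pvSetC (pvSetC Y2 0 (n - 1) y) (n - 1) 0 y) p q =
      if p = N - 1 ∧ q = 0 then y else pvGc (pvSetC Y2 0 (n - 1) y) p q := by
    rw [hc1, hc0]
    exact gc_pvSetC (by rw [← hc1, ← hc0]; exact hS3) (N - 1) 0 (by omega) (by omega) y p q
  have e3 : pvGc (pvSetC Y2 0 (n - 1) y) p q =
      if p = 0 ∧ q = N - 1 then y else pvGc Y2 p q := by
    rw [hc1, hc0]
    exact gc_pvSetC hEs 0 (N - 1) (by omega) (by omega) y p q
  rw [e4, e3, hEg, hOg, gc_zero]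
  unfold pvCell
  simp only [PySem.Int.mod_eq_zero_iff_dvd]
  split_ifs <;> first | rfl | omega

-- ===== VERDICT (by name: the statement is the Claim_ definition above) =====
theorem GenMat_spec : Claim_equal_GenMat := by
  intro x y z n _ hpre
  unfold Spec_GenMat
  exact GenMat_eq_alt x y z n hpre
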